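-- pv_equiv track=rewrite | github.com/TimUnverzagt/Thesis | PyCharm/datasets/preprocessing.py | strip_head
-- ===== SOURCE A (Python) =====
-- def strip_head(text, stripper):
--     split_text = text.split(stripper)
--     truncated_text = ""
--     for i in range(len(split_text)):
--         if i == 0:
--             continue
--         truncated_text += split_text[i]
--     return truncated_text
-- ===== SOURCE B (Python) =====
-- def strip_head(text, stripper):
--     _before, _sep, after = text.partition(stripper)
--     return after.replace(stripper, "")
-- ===== Notes on version B (the rewrite author's own statement) =====
-- stated objective: idiomatic
-- what changed: Replaces split-everything-then-loop-skipping-the-first-part with partition at the first separator followed by replace() stripping the remaining separators, with no explicit loop; both raise ValueError on an empty stripper, which Pre_ excludes.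
import Mathlib
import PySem

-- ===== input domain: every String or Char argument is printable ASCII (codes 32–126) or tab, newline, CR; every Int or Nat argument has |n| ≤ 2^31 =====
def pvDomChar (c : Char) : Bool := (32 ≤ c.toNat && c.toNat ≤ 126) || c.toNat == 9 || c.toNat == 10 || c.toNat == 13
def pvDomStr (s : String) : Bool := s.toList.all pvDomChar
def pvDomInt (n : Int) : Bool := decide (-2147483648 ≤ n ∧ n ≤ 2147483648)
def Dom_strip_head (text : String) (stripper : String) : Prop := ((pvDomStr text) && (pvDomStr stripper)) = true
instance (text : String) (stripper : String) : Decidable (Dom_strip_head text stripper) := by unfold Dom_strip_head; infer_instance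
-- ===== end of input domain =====

-- B replaces split-all-then-concatenate-skipping-the-first with partition at the first separator
-- plus replace() on the tail (idiomatic, no explicit loop); same cost, same values.


-- ===== PORT A =====
def strip_head (text : String) (stripper : String) : String :=
  let split_text := PySem.Chars.splitOn text.toList stripper.toList
  let truncated_text := (PySem.List.pyRange 0 (split_text.length : Int)).foldl
    (fun acc i => if i == 0 then acc else acc ++ ((PySem.List.pyGet? split_text i).getD []))
    ([] : List Char)
  String.mk truncated_text

-- ===== PORT B =====
-- text.partition(stripper) ported by hand via Chars.find (index of the first occurrence, -1 if
-- absent) and a tail slice: exact for stripper ≠ "" (the ValueError case is outside Pre_).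
def strip_head_alt (text : String) (stripper : String) : String :=
  let t := text.toList
  let sep := stripper.toList
  let i := PySem.Chars.find t sep
  let after := if i = -1 then [] else PySem.List.slice t (some (i + (sep.length : Int))) none
  String.mk (PySem.Chars.replace after sep [])

-- ===== PRECONDITION & SPEC =====
-- Pre_ excludes only stripper = "", on which A's text.split("") (and B's partition) raises ValueError.
def Pre_strip_head (text : String) (stripper : String) : Prop := stripper ≠ ""
instance (text : String) (stripper : String) : Decidable (Pre_strip_head text stripper) := by unfold Pre_strip_head; infer_instance
def pvWitness_strip_head : String × String := ("ab|cd|e", "|")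
def Spec_strip_head (text : String) (stripper : String) (out : String) : Prop := out = strip_head_alt text stripper
instance (text : String) (stripper : String) (out : String) : Decidable (Spec_strip_head text stripper out) := by unfold Spec_strip_head; infer_instance

-- ===== CLAIM (what is proved, stated in full; the proofs are below) =====
def Claim_equal_strip_head : Prop := ∀ (text : String) (stripper : String), Dom_strip_head text stripper → Pre_strip_head text stripper → Spec_strip_head text stripper (strip_head text stripper)

-- ===== LEMMAS AND PROOFS =====

-- Structural specification of text.split(sep) for a nonempty sep = s0 :: srest.
def pvSp (s0 : Char) (srest : List Char) : List Char → List (List Char)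
  | [] => [[]]
  | c :: t =>
    if (s0 :: srest).isPrefixOf (c :: t) then
      [] :: pvSp s0 srest ((c :: t).drop (srest.length + 1))
    else (pvSp s0 srest t).modifyHead (c :: ·)
  termination_by l => l.length
  decreasing_by all_goals (simp; try omega)

-- Structural specification of s.replace(sep, "") for a nonempty sep.
def pvRep (s0 : Char) (srest : List Char) : List Char → List Char
  | [] => []
  | c :: t =>
    if (s0 :: srest).isPrefixOf (c :: t) then
      pvRep s0 srest ((c :: t).drop (srest.length + 1))
    else c :: pvRep s0 srest t
  termination_by l => l.length
  decreasing_by all_goals (simp; try omega)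

theorem pvSp_ne_nil (s0 : Char) (srest : List Char) (l : List Char) :
    pvSp s0 srest l ≠ [] := by
  induction l using pvSp.induct s0 srest with
  | case1 => simp [pvSp]
  | case2 c t hp ih => rw [pvSp, if_pos hp]; simp
  | case3 c t hp ih =>
    rw [pvSp, if_neg hp]
    cases hsp : pvSp s0 srest t with
    | nil => exact absurd hsp ih
    | cons hd tl => simp [List.modifyHead]

theorem pvModifyHead_modifyHead {α : Type} (f g : α → α) (xs : List α) :
    (xs.modifyHead g).modifyHead f = xs.modifyHead (f ∘ g) := by
  cases xs <;> simp [List.modifyHead]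

theorem pv_splitOn_go (s0 : Char) (srest : List Char) :
    ∀ (fuel : Nat) (l cur : List Char) (acc : List (List Char)), l.length ≤ fuel →
      PySem.Chars.splitOn.go (s0 :: srest) fuel l cur acc
        = acc.reverse ++ (pvSp s0 srest l).modifyHead (cur.reverse ++ ·) := by
  intro fuel
  induction fuel with
  | zero =>
    intro l cur acc h
    have hl : l = [] := by cases l <;> simp_all
    subst hl
    simp [PySem.Chars.splitOn.go, pvSp, List.modifyHead]
  | succ fuel ih =>
    intro l cur acc h
    cases l with
    | nil => simp [PySem.Chars.splitOn.go, pvSp, List.modifyHead]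
    | cons c t =>
      rw [PySem.Chars.splitOn.go]
      by_cases hp : (s0 :: srest).isPrefixOf (c :: t) = true
      · rw [if_pos hp]
        rw [ih _ _ _ (by simp at h ⊢; omega)]
        rw [pvSp, if_pos hp]
        simp only [List.drop_succ_cons]
        cases hsp : pvSp s0 srest (t.drop srest.length) with
        | nil => exact absurd hsp (pvSp_ne_nil s0 srest _)
        | cons hd tl => simp [hsp, List.modifyHead]
      · rw [if_neg hp]
        rw [ih _ _ _ (by simp at h ⊢; omega)]
        rw [pvSp, if_neg hp]
        rw [pvModifyHead_modifyHead]
        cases hsp : pvSp s0 srest t with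
        | nil => exact absurd hsp (pvSp_ne_nil s0 srest t)
        | cons hd tl => simp [hsp, List.modifyHead]
  termination_by fuel => fuel

theorem pv_splitOn (s0 : Char) (srest : List Char) (l : List Char) :
    PySem.Chars.splitOn l (s0 :: srest) = pvSp s0 srest l := by
  rw [PySem.Chars.splitOn, pv_splitOn_go s0 srest _ _ _ _ (by omega)]
  cases pvSp s0 srest l <;> simp [List.modifyHead]

theorem pv_replace_go (s0 : Char) (srest : List Char) :
    ∀ (fuel : Nat) (l acc : List Char), l.length ≤ fuel →
      PySem.Chars.replace.go (s0 :: srest) [] fuel l acc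
        = acc.reverse ++ pvRep s0 srest l := by
  intro fuel
  induction fuel with
  | zero =>
    intro l acc h
    have hl : l = [] := by cases l <;> simp_all
    subst hl
    simp [PySem.Chars.replace.go, pvRep]
  | succ fuel ih =>
    intro l acc h
    cases l with
    | nil => simp [PySem.Chars.replace.go, pvRep]
    | cons c t =>
      rw [PySem.Chars.replace.go]
      by_cases hp : (s0 :: srest).isPrefixOf (c :: t) = true
      · rw [if_pos hp]
        rw [ih _ _ (by simp at h ⊢; omega)]
        rw [pvRep, if_pos hp]
        simp
      · rw [if_neg hp]
        rw [ih _ _ (by simp at h ⊢; omega)]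
        rw [pvRep, if_neg hp]
        simp

theorem pv_replace (s0 : Char) (srest : List Char) (l : List Char) :
    PySem.Chars.replace l (s0 :: srest) [] = pvRep s0 srest l := by
  rw [PySem.Chars.replace]
  simp only [List.isEmpty_cons]
  rw [pv_replace_go s0 srest _ _ _ (by omega)]
  simp

theorem pvRep_eq_flatten (s0 : Char) (srest : List Char) (l : List Char) :
    pvRep s0 srest l = (pvSp s0 srest l).flatten := by
  induction l using pvSp.induct s0 srest with
  | case1 => simp [pvRep, pvSp]
  | case2 c t hp ih =>
    rw [pvRep, if_pos hp, pvSp, if_pos hp, ih]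
    simp
  | case3 c t hp ih =>
    rw [pvRep, if_neg hp, pvSp, if_neg hp, ih]
    cases hsp : pvSp s0 srest t with
    | nil => exact absurd hsp (pvSp_ne_nil s0 srest t)
    | cons hd tl => simp [List.modifyHead]

-- No occurrence of sep in l: split yields the single piece l.
theorem pvSp_of_not_infix (s0 : Char) (srest : List Char) (l : List Char)
    (h : ¬ (s0 :: srest) <:+: l) : pvSp s0 srest l = [l] := by
  induction l using pvSp.induct s0 srest with
  | case1 => simp [pvSp]
  | case2 c t hp ih =>
    exact absurd ((List.isPrefixOf_iff_prefix.mp hp).isInfix) h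
  | case3 c t hp ih =>
    rw [pvSp, if_neg hp, ih (fun hi => h (List.infix_cons hi))]
    simp [List.modifyHead]

-- First occurrence of sep at index k: split peels off take k and continues after the separator.
theorem pvSp_first_occ (s0 : Char) (srest : List Char) :
    ∀ (k : Nat) (l : List Char),
      (s0 :: srest) <+: l.drop k → (∀ i < k, ¬ (s0 :: srest) <+: l.drop i) →
      pvSp s0 srest l = l.take k :: pvSp s0 srest (l.drop (k + (srest.length + 1))) := by
  intro k
  induction k with
  | zero =>
    intro l hpre _
    simp only [List.drop_zero] at hpre
    obtain ⟨r, hr⟩ := hpre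
    cases l with
    | nil => simp at hr
    | cons c t =>
      rw [pvSp, if_pos (List.isPrefixOf_iff_prefix.mpr ⟨r, hr⟩)]
      simp
  | succ k ih =>
    intro l hpre hmin
    cases l with
    | nil =>
      simp at hpre
    | cons c t =>
      have hnp : ¬ (s0 :: srest).isPrefixOf (c :: t) = true := by
        intro hp
        exact hmin 0 (by omega) (by simpa using List.isPrefixOf_iff_prefix.mp hp)
      rw [pvSp, if_neg hnp]
      have ht := ih t (by simpa using hpre)
        (fun i hi => by simpa using hmin (i + 1) (by omega))
      rw [ht]
      simp only [List.modifyHead]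
      rw [show k + 1 + (srest.length + 1) = (k + (srest.length + 1)) + 1 from by omega]
      simp [List.drop_succ_cons, List.take_succ_cons]

-- A's indexed loop over range(len(xs)) skipping i = 0 concatenates the tail pieces.
theorem pv_fold_tail_flatten (xs : List (List Char)) :
    (PySem.List.pyRange 0 (xs.length : Int)).foldl
      (fun acc i => if i == 0 then acc else acc ++ ((PySem.List.pyGet? xs i).getD [])) []
      = xs.tail.flatten := by
  have key : ∀ (d a : Nat) (init : List Char), 1 ≤ a → xs.length - a ≤ d →
      (PySem.List.pyRange (a : Int) (xs.length : Int)).foldl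
        (fun acc i => if i == 0 then acc else acc ++ ((PySem.List.pyGet? xs i).getD [])) init
        = init ++ (xs.drop a).flatten := by
    intro d
    induction d with
    | zero =>
      intro a init ha hd
      rw [PySem.List.pyRange_one_eq_nil (by exact_mod_cast (by omega : xs.length ≤ a))]
      rw [List.drop_eq_nil_of_le (by omega : xs.length ≤ a)]
      simp
    | succ d ih =>
      intro a init ha hd
      by_cases hlt : a < xs.length
      · rw [PySem.List.pyRange_one_cons (by exact_mod_cast hlt)]
        simp only [List.foldl_cons]
        have hne : ((a : Int) == 0) = false := by
          rw [beq_eq_false_iff_ne]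
          exact_mod_cast Nat.one_le_iff_ne_zero.mp ha
        rw [hne]
        simp only [Bool.false_eq_true, if_false]
        rw [PySem.List.pyGet?_natCast]
        have : ((a : Int) + 1) = ((a + 1 : Nat) : Int) := by push_cast; ring
        rw [this, ih (a + 1) _ (by omega) (by omega)]
        simp only [List.getElem?_eq_getElem hlt, Option.getD_some, List.append_assoc]
        rw [List.drop_eq_getElem_cons hlt, List.flatten_cons]
      · rw [PySem.List.pyRange_one_eq_nil (by exact_mod_cast (by omega : xs.length ≤ a))]
        rw [List.drop_eq_nil_of_le (by omega : xs.length ≤ a)]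
        simp
  cases xs with
  | nil => simp [PySem.List.pyRange_one_eq_nil]
  | cons x rest =>
    have hsplit : PySem.List.pyRange 0 (((x :: rest).length : Nat) : Int)
        = PySem.List.pyRange 0 1 ++ PySem.List.pyRange ((1 : Nat) : Int) (((x :: rest).length : Nat) : Int) := by
      rw [PySem.List.pyRange_one_append 0 ((1 : Nat) : Int) _ (by norm_num)
        (by exact_mod_cast Nat.succ_le_of_lt (Nat.succ_pos rest.length))]
      norm_num
    rw [hsplit, List.foldl_append]
    have h0 : PySem.List.pyRange 0 1 = [0] := by decide
    rw [h0]
    simpa [List.foldl_cons] using key (x :: rest).length 1 [] (by omega) (by omega)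

-- ===== VERDICT (by name: the statement is the Claim_ definition above) =====
theorem strip_head_spec : Claim_equal_strip_head := by
  intro text stripper _hdom hpre
  unfold Spec_strip_head strip_head strip_head_alt
  have hsep : stripper.toList ≠ [] := by
    intro h
    exact hpre (String.toList_eq_nil_iff.mp h)
  obtain ⟨s0, srest, hs⟩ : ∃ s0 srest, stripper.toList = s0 :: srest := by
    cases h : stripper.toList with
    | nil => exact absurd h hsep
    | cons a b => exact ⟨a, b, rfl⟩
  simp only [hs]
  rw [pv_splitOn, pv_fold_tail_flatten]
  congr 1
  by_cases hocc : (s0 :: srest) <:+: text.toList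
  · have hpos : 0 ≤ PySem.Chars.find text.toList (s0 :: srest) :=
      (PySem.Chars.find_nonneg_iff _ _).mpr hocc
    have hneq : PySem.Chars.find text.toList (s0 :: srest) ≠ -1 := by omega
    obtain ⟨hfst, hmin⟩ := PySem.Chars.find_spec hpos
    set k := (PySem.Chars.find text.toList (s0 :: srest)).toNat with hk
    rw [pvSp_first_occ s0 srest k text.toList hfst hmin]
    rw [if_neg hneq]
    have hcast : PySem.Chars.find text.toList (s0 :: srest) + ((s0 :: srest).length : Int)
        = ((k + (srest.length + 1) : Nat) : Int) := by
      simp only [List.length_cons]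
      push_cast
      omega
    rw [hcast, PySem.List.slice_from_natCast]
    rw [pv_replace, pvRep_eq_flatten]
    simp
  · have hneg : PySem.Chars.find text.toList (s0 :: srest) = -1 :=
      (PySem.Chars.find_eq_neg_one_iff _ _).mpr hocc
    rw [pvSp_of_not_infix s0 srest _ hocc, hneg, if_pos rfl]
    rw [pv_replace, pvRep]
    simp
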